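-- pv_equiv track=rewrite | github.com/jemtca/CodingBat | Python/List-3/count_clumps.py | count_clumps
-- ===== SOURCE A (Python) =====
-- def count_clumps(nums):
--     count_clumps = 0
--     match = False
--
--     for x in range(len(nums) - 1):
--         if nums[x] == nums[x+1] and not match:
--             match = True
--             count_clumps += 1
--         elif nums[x] != nums[x+1]:
--             match = False
--
--     return count_clumps
-- ===== SOURCE B (Python) =====
-- def count_clumps(nums):
--     runs = []  # run-length encoding: [value, length] per maximal run, in order
--     for v in nums:
--         if runs and runs[-1][0] == v:
--             runs[-1][1] += 1
--         else:
--             runs.append([v, 1])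
--     return sum(1 for _, length in runs if length >= 2)
-- ===== Notes on version B (the rewrite author's own statement) =====
-- stated objective: alternative
-- what changed: B builds a run-length encoding of the list in one pass and then counts the runs of length >= 2, instead of A's pairwise index scan carrying a boolean 'inside a clump' flag.
import Mathlib
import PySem

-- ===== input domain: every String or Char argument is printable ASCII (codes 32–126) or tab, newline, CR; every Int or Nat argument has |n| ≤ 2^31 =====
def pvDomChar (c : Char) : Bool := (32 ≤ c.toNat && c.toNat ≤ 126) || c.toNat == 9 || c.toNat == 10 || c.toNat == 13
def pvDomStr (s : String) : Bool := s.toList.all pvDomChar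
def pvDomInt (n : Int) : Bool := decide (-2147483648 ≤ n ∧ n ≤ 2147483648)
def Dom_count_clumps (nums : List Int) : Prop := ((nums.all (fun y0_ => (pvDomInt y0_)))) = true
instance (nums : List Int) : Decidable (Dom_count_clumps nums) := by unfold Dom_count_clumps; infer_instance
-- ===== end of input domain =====

-- B replaces A's pairwise scan with a carried boolean flag by a run-length
-- encoding built in one pass, then counts the runs of length ≥ 2 (alternative
-- decomposition, same asymptotic cost). No argument is mutated.

-- ===== PORT A =====
-- literal port of A: for x in range(len(nums)-1), state (count_clumps, match)
def count_clumps (nums : List Int) : Int :=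
  (((PySem.List.pyRange 0 ((nums.length : Int) - 1) 1).foldl
    (fun (st : Int × Bool) x =>
      if (PySem.List.pyGetD nums x 0 == PySem.List.pyGetD nums (x + 1) 0) && !st.2 then
        (st.1 + 1, true)
      else if PySem.List.pyGetD nums x 0 != PySem.List.pyGetD nums (x + 1) 0 then
        (st.1, false)
      else st)
    (0, false)).1)

-- ===== PORT B =====
-- literal port of Source B: build the run-length encoding `runs` (value, length),
-- appending a new run or bumping the last run's length ("runs[-1][1] += 1" is
-- rendered as dropLast ++ [(u, n+1)], the same last-slot update), then count
-- the runs whose length is ≥ 2.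
def count_clumps_alt (nums : List Int) : Int :=
  let runs := nums.foldl
    (fun (runs : List (Int × Int)) v =>
      match runs.getLast? with
      | some (u, n) => if u == v then runs.dropLast ++ [(u, n + 1)] else runs ++ [(v, 1)]
      | none => runs ++ [(v, 1)])
    []
  ((runs.filter (fun r => 2 ≤ r.2)).length : Int)

-- ===== PRECONDITION & SPEC =====
def Spec_count_clumps (nums : List Int) (out : Int) : Prop := out = count_clumps_alt nums
instance (nums : List Int) (out : Int) : Decidable (Spec_count_clumps nums out) := by unfold Spec_count_clumps; infer_instance

-- ===== CLAIM (what is proved, stated in full; the proofs are below) =====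
def Claim_equal_count_clumps : Prop := ∀ (nums : List Int), Dom_count_clumps nums → Spec_count_clumps nums (count_clumps nums)

-- ===== LEMMAS AND PROOFS =====

-- A's loop state transition on one adjacent pair (a, b)
def stepA (st : Int × Bool) (a b : Int) : Int × Bool :=
  if (a == b) && !st.2 then (st.1 + 1, true)
  else if a != b then (st.1, false)
  else st

-- A's loop, structurally: prev = current element, m = match flag
def auxA2 : Int → List Int → Bool → Int
  | _, [], _ => 0
  | prev, x :: xs, m =>
    if prev = x ∧ m = false then 1 + auxA2 x xs true
    else if prev ≠ x then auxA2 x xs false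
    else auxA2 x xs m

-- B's count, structurally: current run value v of length k, remaining xs
def auxR : Int → Int → List Int → Int
  | _, k, [] => if 2 ≤ k then 1 else 0
  | v, k, x :: xs => if x = v then auxR v (k + 1) xs else (if 2 ≤ k then 1 else 0) + auxR x 1 xs

-- B's foldl step, and its head-side (reversed runs) counterpart
def stepB (runs : List (Int × Int)) (v : Int) : List (Int × Int) :=
  match runs.getLast? with
  | some (u, n) => if u == v then runs.dropLast ++ [(u, n + 1)] else runs ++ [(v, 1)]
  | none => runs ++ [(v, 1)]

def stepRev (runs : List (Int × Int)) (v : Int) : List (Int × Int) :=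
  match runs with
  | (u, n) :: rest => if u == v then (u, n + 1) :: rest else (v, 1) :: (u, n) :: rest
  | [] => [(v, 1)]

theorem stepB_rev (rs : List (Int × Int)) (v : Int) :
    stepB rs.reverse v = (stepRev rs v).reverse := by
  cases rs with
  | nil => simp [stepB, stepRev]
  | cons p rest =>
    obtain ⟨u, n⟩ := p
    by_cases h : u = v <;>
      simp [stepB, stepRev, h]

theorem foldl_stepB_rev (xs : List Int) : ∀ (rs : List (Int × Int)),
    xs.foldl stepB rs.reverse = (xs.foldl stepRev rs).reverse := by
  induction xs with
  | nil => intro rs; rfl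
  | cons x xs ih =>
    intro rs
    simp only [List.foldl_cons, stepB_rev, ih]

-- counting long runs over the reversed-runs fold = auxR on the head run
theorem countP_foldl_stepRev (xs : List Int) : ∀ (v k : Int) (rest : List (Int × Int)),
    ((xs.foldl stepRev ((v, k) :: rest)).countP (fun r => decide (2 ≤ r.2)) : Int)
      = auxR v k xs + (rest.countP (fun r => decide (2 ≤ r.2)) : Int) := by
  induction xs with
  | nil =>
    intro v k rest
    by_cases h : (2 : Int) ≤ k <;> simp [auxR, h] <;> omega
  | cons x xs ih =>
    intro v k rest
    by_cases h : x = v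
    · simp [stepRev, h, auxR, ih]
    · have h' : ¬ (v == x) = true := by simp [h]; omega
      have hx : (v == x) = false := by simp_all
      simp only [List.foldl_cons, stepRev, hx, Bool.false_eq_true, if_false, auxR, h, ih]
      rw [List.countP_cons]
      by_cases h2 : (2 : Int) ≤ k <;> simp [h2] <;> push_cast <;> omega

theorem auxR_eq (xs : List Int) : ∀ (v k : Int), 1 ≤ k →
    auxR v k xs = auxA2 v xs (decide (2 ≤ k)) + (if 2 ≤ k then 1 else 0) := by
  induction xs with
  | nil => intro v k _; simp [auxR, auxA2]
  | cons x xs ih =>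
    intro v k hk
    by_cases h : x = v
    · subst h
      have h2 : (2 : Int) ≤ k + 1 := by omega
      rw [auxR, if_pos rfl, ih x (k + 1) (by omega)]
      by_cases hk2 : (2 : Int) ≤ k
      · simp [auxA2, hk2, h2]
      · have : k = 1 := by omega
        subst this
        simp [auxA2]
        omega
    · rw [auxR, if_neg h, ih x 1 (by omega)]
      have : ¬ ((2:Int) ≤ 1) := by omega
      simp [auxA2, this]
      by_cases hk2 : (2 : Int) ≤ k <;> simp [hk2] <;> omega

-- A's pair fold equals auxA2
theorem pairs_eq_aux (xs : List Int) : ∀ (prev c : Int) (m : Bool),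
    (((prev :: xs).zip xs).foldl (fun s p => stepA s p.1 p.2) (c, m)).1
      = c + auxA2 prev xs m := by
  induction xs with
  | nil => intro prev c m; simp [auxA2]
  | cons x xs ih =>
    intro prev c m
    have hz : ((prev :: x :: xs).zip (x :: xs)) = (prev, x) :: ((x :: xs).zip xs) := rfl
    rw [hz, List.foldl_cons]
    by_cases h : prev = x
    · cases m with
      | false =>
        rw [show stepA (c, false) (prev, x).1 (prev, x).2 = (c + 1, true) by
          simp [stepA, h]]
        rw [ih x (c + 1) true]
        simp [auxA2, h]
        ring
      | true =>
        rw [show stepA (c, true) (prev, x).1 (prev, x).2 = (c, true) by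
          simp [stepA, h]]
        rw [ih x c true]
        simp [auxA2, h]
    · rw [show stepA (c, m) (prev, x).1 (prev, x).2 = (c, false) by
        simp [stepA, h]]
      rw [ih x c false]
      simp [auxA2, h]

-- indexed fold over range(n-1) = fold over adjacent pairs
theorem foldl_range_pairs {σ : Type} (f : σ → Int → Int → σ) :
    ∀ (l : List Int) (s : σ),
    (List.range (l.length - 1)).foldl (fun s k => f s (l.getD k 0) (l.getD (k + 1) 0)) s
      = (l.zip l.tail).foldl (fun s p => f s p.1 p.2) s := by
  intro l
  induction l with
  | nil => intro s; simp
  | cons a t ih =>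
    intro s
    cases t with
    | nil => simp
    | cons b u =>
      have hlen : (a :: b :: u).length - 1 = ((b :: u).length - 1) + 1 := by simp
      rw [hlen, List.range_succ_eq_map, List.foldl_cons, List.foldl_map]
      simp only [Nat.succ_eq_add_one, List.getD_cons_zero, List.getD_cons_succ] at ih ⊢
      rw [ih]
      simp [List.zip]

-- A's port, rewritten through the pair fold
theorem portA_pairs (l : List Int) :
    count_clumps l = ((l.zip l.tail).foldl (fun s p => stepA s p.1 p.2) (0, false)).1 := by
  cases l with
  | nil => simp [count_clumps, PySem.List.pyRange]
  | cons a t =>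
    unfold count_clumps
    have h1 : ((a :: t).length : Int) - 1 = ((a :: t).length - 1 : Nat) := by
      simp
    rw [h1, PySem.List.pyRange_zero_nat, List.foldl_map]
    have hbody : (fun (st : Int × Bool) (k : Nat) =>
        if (PySem.List.pyGetD (a :: t) (k : Int) 0 == PySem.List.pyGetD (a :: t) ((k : Int) + 1) 0) && !st.2 then (st.1 + 1, true)
        else if PySem.List.pyGetD (a :: t) (k : Int) 0 != PySem.List.pyGetD (a :: t) ((k : Int) + 1) 0 then (st.1, false)
        else st)
        = fun st k => stepA st ((a :: t).getD k 0) ((a :: t).getD (k + 1) 0) := by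
      funext st k
      have h2 : ((k : Int) + 1) = ((k + 1 : Nat) : Int) := by push_cast; ring
      rw [h2, PySem.List.pyGetD_natCast, PySem.List.pyGetD_natCast]
      rfl
    rw [hbody, foldl_range_pairs]

-- ===== VERDICT (by name: the statement is the Claim_ definition above) =====
theorem count_clumps_spec : Claim_equal_count_clumps := by
  intro nums _
  unfold Spec_count_clumps
  rw [portA_pairs]
  cases nums with
  | nil => simp [count_clumps_alt]
  | cons v rest =>
    simp only [List.tail_cons]
    rw [pairs_eq_aux rest v 0 false]
    have halt : count_clumps_alt (v :: rest)
        = ((((v :: rest).foldl stepB []).filter (fun r => decide (2 ≤ r.2))).length : Int) := rfl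
    have hrev : (v :: rest).foldl stepB [] = ((v :: rest).foldl stepRev []).reverse := by
      have := foldl_stepB_rev (v :: rest) []
      simpa using this
    rw [halt, hrev, ← List.countP_eq_length_filter, List.countP_reverse]
    have hstep1 : (v :: rest).foldl stepRev [] = rest.foldl stepRev [(v, 1)] := by
      simp [List.foldl_cons, stepRev]
    rw [hstep1]
    have hcnt := countP_foldl_stepRev rest v 1 []
    simp only [List.countP_nil, Nat.cast_zero, add_zero] at hcnt
    rw [hcnt, auxR_eq rest v 1 (by omega)]
    norm_num
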